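-- pv_equiv track=rewrite | github.com/Semeriuss/A2SV-Labs | contest_problems/code_forces_2/5. oneBasedArithmetic.py | _helper
-- ===== SOURCE A (Python) =====
-- def _helper(num, count):
--     if num == 0:
--         return count
--
--     n = len(str(num)) if num > 0 else len(str(num)) - 1
--     if n == 1:
--         if num > 6:
--             num -= 11
--             count += 2
--             return _helper(num, count)
--         elif 0 < num <= 6:
--             num -= 1
--             count += 1
--             return _helper(num, count)
--         elif num < -6:
--             num += 11
--             count += 2
--             return _helper(num, count)
--         else:
--             num += 1
--             count += 1
--             return _helper(num, count)
--     else: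
--         if num > 0:
--             toSubtract = int("".join(["1" for i in range(n)])) if abs(num - int("".join(["1" for i in range(n)]))) < abs(num - int("".join(["1" for i in range(n + 1)]))) else int("".join(["1" for i in range(n + 1)]))
--             num -= toSubtract
--             count += len(str(toSubtract))
--             return _helper(num, count)
--         else:
--             toAdd = int("".join(["1" for i in range(n)])) if abs(num - int("".join(["1" for i in range(n)]))) < abs(num - int("".join(["1" for i in range(n + 1)]))) else int("".join(["1" for i in range(n + 1)]))
--             num += toAdd
--             count += len(str(toAdd))
--             return _helper(num, count)
-- ===== SOURCE B (Python) =====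
-- def _helper(num, count):
--     while num != 0:
--         if -10 < num < 10:
--             if num > 6 or num < -6:
--                 num -= 11 if num > 0 else -11
--                 count += 2
--             else:
--                 num -= 1 if num > 0 else -1
--                 count += 1
--         else:
--             a = num if num > 0 else -num
--             d = 0
--             while a > 0:
--                 a //= 10
--                 d += 1
--             r1 = (10 ** d - 1) // 9
--             r2 = (10 ** (d + 1) - 1) // 9
--             if num > 0:
--                 if abs(num - r1) < abs(num - r2):
--                     num -= r1
--                     count += d
--                 else:
--                     num -= r2
--                     count += d + 1
--             else:
--                 num += r1
--                 count += d
--     return count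
-- ===== Notes on version B (the rewrite author's own statement) =====
-- stated objective: simpler
-- what changed: Replaces A's tail recursion and string-built repunits (int(''.join(['1' ...])), len(str(...))) by an iterative while-loop that counts digits and computes repunits arithmetically as (10**d-1)//9, folding the vacuous nearest-repunit comparison on the negative side into a direct add.
import Mathlib
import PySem

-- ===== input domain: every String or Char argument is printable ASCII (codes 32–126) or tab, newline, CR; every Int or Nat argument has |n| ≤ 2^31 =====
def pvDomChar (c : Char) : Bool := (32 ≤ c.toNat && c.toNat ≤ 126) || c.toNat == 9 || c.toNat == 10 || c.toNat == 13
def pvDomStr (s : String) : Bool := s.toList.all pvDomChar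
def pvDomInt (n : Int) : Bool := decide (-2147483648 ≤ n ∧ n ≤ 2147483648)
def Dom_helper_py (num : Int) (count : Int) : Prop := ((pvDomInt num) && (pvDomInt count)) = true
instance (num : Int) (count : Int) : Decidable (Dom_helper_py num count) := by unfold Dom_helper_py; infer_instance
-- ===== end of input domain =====

-- B replaces A's string-built repunits and tail recursion by an iterative loop with
-- arithmetic repunits and digit counting (objective: simpler — no str/join/int round-trips).
-- Both ports use a fuel parameter only as a totality guard (|num| strictly decreases each step).

-- ===== PORT A =====
-- int("".join(["1" for i in range(k)])); the .getD 0 is unreachable (k ≥ 2 where used)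
def onesA (k : Int) : Int :=
  (PySem.Int.ofStr? (PySem.Str.join "" ((PySem.List.pyRange 0 k 1).map (fun _ => "1")))).getD 0

def helperA_go : Nat → Int → Int → Int
  | 0, _, count => count
  | fuel+1, num, count =>
    if num = 0 then count
    else
      let n : Int := if num > 0 then (PySem.Str.len (PySem.Int.toStr num) : Int)
                     else (PySem.Str.len (PySem.Int.toStr num) : Int) - 1
      if n = 1 then
        if num > 6 then helperA_go fuel (num - 11) (count + 2)
        else if 0 < num ∧ num ≤ 6 then helperA_go fuel (num - 1) (count + 1)
        else if num < -6 then helperA_go fuel (num + 11) (count + 2)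
        else helperA_go fuel (num + 1) (count + 1)
      else
        if num > 0 then
          let toSubtract : Int :=
            if |num - onesA n| < |num - onesA (n + 1)| then onesA n else onesA (n + 1)
          helperA_go fuel (num - toSubtract) (count + (PySem.Str.len (PySem.Int.toStr toSubtract) : Int))
        else
          let toAdd : Int :=
            if |num - onesA n| < |num - onesA (n + 1)| then onesA n else onesA (n + 1)
          helperA_go fuel (num + toAdd) (count + (PySem.Str.len (PySem.Int.toStr toAdd) : Int))

def helper_py (num : Int) (count : Int) : Int := helperA_go (num.natAbs + 1) num count

-- ===== PORT B =====
-- B's inner `while a > 0: a //= 10; d += 1` digit-count loop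
def countDigits : Nat → Nat
  | 0 => 0
  | m+1 => countDigits ((m+1)/10) + 1
decreasing_by exact Nat.div_lt_self (Nat.succ_pos m) (by norm_num)

def helperB_go : Nat → Int → Int → Int
  | 0, _, count => count
  | fuel+1, num, count =>
    if num = 0 then count
    else if -10 < num ∧ num < 10 then
      if num > 6 ∨ num < -6 then
        helperB_go fuel (num - (if num > 0 then (11:Int) else -11)) (count + 2)
      else
        helperB_go fuel (num - (if num > 0 then (1:Int) else -1)) (count + 1)
    else
      let d : Nat := countDigits num.natAbs
      let r1 : Int := PySem.Int.floordiv (10 ^ d - 1) 9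
      let r2 : Int := PySem.Int.floordiv (10 ^ (d + 1) - 1) 9
      if num > 0 then
        if |num - r1| < |num - r2| then helperB_go fuel (num - r1) (count + (d : Int))
        else helperB_go fuel (num - r2) (count + (d : Int) + 1)
      else helperB_go fuel (num + r1) (count + (d : Int))

def helper_py_alt (num : Int) (count : Int) : Int := helperB_go (num.natAbs + 1) num count

-- ===== PRECONDITION & SPEC =====
def Spec_helper_py (num : Int) (count : Int) (out : Int) : Prop := out = helper_py_alt num count
instance (num : Int) (count : Int) (out : Int) : Decidable (Spec_helper_py num count out) := by unfold Spec_helper_py; infer_instance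

-- ===== CLAIM (what is proved, stated in full; the proofs are below) =====
def Claim_equal_helper_py : Prop := ∀ (num : Int) (count : Int), Dom_helper_py num count → Spec_helper_py num count (helper_py num count)

-- ===== LEMMAS AND PROOFS =====

lemma toDigitsCore_len (f : Nat) : ∀ (n : Nat) (l : List Char), n < f →
    (Nat.toDigitsCore 10 f n l).length = (if n = 0 then 1 else countDigits n) + l.length := by
  induction f with
  | zero => intro n l h; omega
  | succ f ih =>
    intro n l h
    by_cases h0 : n / 10 = 0
    · have hn : n < 10 := by omega
      simp only [Nat.toDigitsCore, h0, if_pos, List.length_cons]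
      by_cases hz : n = 0
      · simp [hz]; omega
      · obtain ⟨m, rfl⟩ := Nat.exists_eq_succ_of_ne_zero hz
        rw [if_neg hz, countDigits, h0, countDigits]
        omega
    · have hn : 10 ≤ n := by omega
      have hz : n ≠ 0 := by omega
      obtain ⟨m, rfl⟩ := Nat.exists_eq_succ_of_ne_zero hz
      simp only [Nat.toDigitsCore, h0, ite_false]
      rw [ih _ _ (by omega)]
      rw [if_neg h0, if_neg hz, countDigits]
      simp only [Nat.succ_eq_add_one, List.length_cons]
      omega

lemma toDigits_len (m : Nat) (h : 0 < m) : (Nat.toDigits 10 m).length = countDigits m := by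
  rw [Nat.toDigits, toDigitsCore_len (m+1) m [] (by omega), if_neg (by omega)]
  simp

-- A's `n` equals B's digit count, for num ≠ 0
lemma lenA_eq (num : Int) (h : num ≠ 0) :
    (if num > 0 then (PySem.Str.len (PySem.Int.toStr num) : Int)
     else (PySem.Str.len (PySem.Int.toStr num) : Int) - 1) = (countDigits num.natAbs : Int) := by
  have hlen : PySem.Str.len (PySem.Int.toStr num) = (PySem.Int.toChars num).length := by
    simp [PySem.Str.len_eq, PySem.Int.toStr]
  by_cases hp : num > 0
  · rw [if_pos hp, hlen]
    have hnn : ¬ num < 0 := by omega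
    rw [PySem.Int.toChars, if_neg hnn]
    have h2 : num.toNat = num.natAbs := by omega
    rw [h2, toDigits_len _ (by omega)]
  · rw [if_neg hp, hlen]
    have hneg : num < 0 := by omega
    rw [PySem.Int.toChars, if_pos hneg, List.length_cons,
        toDigits_len _ (by omega)]
    push_cast
    ring

lemma countDigits_bounds : ∀ m : Nat, 0 < m →
    10 ^ (countDigits m - 1) ≤ m ∧ m < 10 ^ (countDigits m) := by
  intro m
  induction m using Nat.strong_induction_on with
  | _ m ih =>
    intro hm
    obtain ⟨k, rfl⟩ := Nat.exists_eq_succ_of_ne_zero (by omega : m ≠ 0)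
    rw [countDigits]
    by_cases h10 : k + 1 < 10
    · have : (k+1)/10 = 0 := by omega
      rw [this, countDigits]
      norm_num
      omega
    · have hq : 0 < (k+1)/10 := by omega
      have hlt : (k+1)/10 < k+1 := Nat.div_lt_self (by omega) (by norm_num)
      obtain ⟨hlo, hhi⟩ := ih _ hlt hq
      have hc : 0 < countDigits ((k+1)/10) := by
        obtain ⟨j, hj⟩ := Nat.exists_eq_succ_of_ne_zero (by omega : (k+1)/10 ≠ 0)
        rw [hj, countDigits]; omega
      constructor
      · have : 10 ^ (countDigits ((k+1)/10) - 1 + 1) ≤ ((k+1)/10) * 10 := by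
          rw [pow_succ]; exact Nat.mul_le_mul_right 10 hlo
        have h2 : countDigits ((k+1)/10) + 1 - 1 = countDigits ((k+1)/10) - 1 + 1 := by omega
        rw [h2]
        calc 10 ^ (countDigits ((k+1)/10) - 1 + 1) ≤ ((k+1)/10) * 10 := this
          _ ≤ k + 1 := by omega
      · rw [pow_succ]
        have : k + 1 < ((k+1)/10 + 1) * 10 := by omega
        calc k + 1 < ((k+1)/10 + 1) * 10 := this
          _ ≤ 10 ^ countDigits ((k+1)/10) * 10 := Nat.mul_le_mul_right 10 (by omega)

lemma countDigits_le_ten (m : Nat) (h : m ≤ 2147483648) : countDigits m ≤ 10 := by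
  by_cases hm : m = 0
  · rw [hm, countDigits]; omega
  · by_contra hc
    have h11 : 11 ≤ countDigits m := by omega
    have := (countDigits_bounds m (by omega)).1
    have : (10:Nat) ^ 10 ≤ 10 ^ (countDigits m - 1) := Nat.pow_le_pow_right (by norm_num) (by omega)
    omega

lemma go_eq : ∀ (f : Nat) (num count : Int), num.natAbs ≤ 2147483648 →
    helperA_go f num count = helperB_go f num count := by
  intro f
  induction f with
  | zero => intro num count _; rfl
  | succ f ih =>
    intro num count hb
    by_cases h0 : num = 0
    · simp [helperA_go, helperB_go, h0]
    · rw [helperA_go, helperB_go, if_neg h0, if_neg h0]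
      simp only []
      rw [lenA_eq num h0]
      have hm : 0 < num.natAbs := by omega
      obtain ⟨hlo, hhi⟩ := countDigits_bounds num.natAbs hm
      have hc10 : countDigits num.natAbs ≤ 10 := countDigits_le_ten _ hb
      have hc1 : 1 ≤ countDigits num.natAbs := by
        obtain ⟨k, hk⟩ := Nat.exists_eq_succ_of_ne_zero (by omega : num.natAbs ≠ 0)
        rw [hk, countDigits]; omega
      set c := countDigits num.natAbs with hcdef
      clear_value c
      interval_cases c
      -- c = 1: single-digit branch on both sides
      · norm_num at hlo hhi
        rw [if_pos (by norm_num : ((1:ℕ):ℤ) = 1), if_pos (by omega : -10 < num ∧ num < 10)]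
        split_ifs <;>
          first
            | omega
            | exact ih _ _ (by omega)
      · norm_num at hlo hhi
        rw [if_neg (by norm_num : ¬ ((2:ℕ):ℤ) = 1), if_neg (by omega : ¬ (-10 < num ∧ num < 10))]
        rw [show onesA ((2:ℕ):ℤ) = (11:ℤ) from by decide,
            show onesA (((2:ℕ):ℤ) + 1) = (111:ℤ) from by decide,
            show PySem.Int.floordiv (10 ^ (2:ℕ) - 1) 9 = (11:ℤ) from by decide,
            show PySem.Int.floordiv (10 ^ ((2:ℕ) + 1) - 1) 9 = (111:ℤ) from by decide]
        simp only [Int.abs_eq_natAbs]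
        split_ifs <;>
          first
            | omega
            | (rw [show PySem.Str.len (PySem.Int.toStr (11:ℤ)) = ((2:ℕ):ℤ) from by decide]
               exact ih _ _ (by omega))
            | (rw [show PySem.Str.len (PySem.Int.toStr (111:ℤ)) = (((2:ℕ):ℤ) + 1) from by decide,
                   ← add_assoc]
               exact ih _ _ (by omega))
      · norm_num at hlo hhi
        rw [if_neg (by norm_num : ¬ ((3:ℕ):ℤ) = 1), if_neg (by omega : ¬ (-10 < num ∧ num < 10))]
        rw [show onesA ((3:ℕ):ℤ) = (111:ℤ) from by decide,
            show onesA (((3:ℕ):ℤ) + 1) = (1111:ℤ) from by decide,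
            show PySem.Int.floordiv (10 ^ (3:ℕ) - 1) 9 = (111:ℤ) from by decide,
            show PySem.Int.floordiv (10 ^ ((3:ℕ) + 1) - 1) 9 = (1111:ℤ) from by decide]
        simp only [Int.abs_eq_natAbs]
        split_ifs <;>
          first
            | omega
            | (rw [show PySem.Str.len (PySem.Int.toStr (111:ℤ)) = ((3:ℕ):ℤ) from by decide]
               exact ih _ _ (by omega))
            | (rw [show PySem.Str.len (PySem.Int.toStr (1111:ℤ)) = (((3:ℕ):ℤ) + 1) from by decide,
                   ← add_assoc]
               exact ih _ _ (by omega))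
      · norm_num at hlo hhi
        rw [if_neg (by norm_num : ¬ ((4:ℕ):ℤ) = 1), if_neg (by omega : ¬ (-10 < num ∧ num < 10))]
        rw [show onesA ((4:ℕ):ℤ) = (1111:ℤ) from by decide,
            show onesA (((4:ℕ):ℤ) + 1) = (11111:ℤ) from by decide,
            show PySem.Int.floordiv (10 ^ (4:ℕ) - 1) 9 = (1111:ℤ) from by decide,
            show PySem.Int.floordiv (10 ^ ((4:ℕ) + 1) - 1) 9 = (11111:ℤ) from by decide]
        simp only [Int.abs_eq_natAbs]
        split_ifs <;>
          first
            | omega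
            | (rw [show PySem.Str.len (PySem.Int.toStr (1111:ℤ)) = ((4:ℕ):ℤ) from by decide]
               exact ih _ _ (by omega))
            | (rw [show PySem.Str.len (PySem.Int.toStr (11111:ℤ)) = (((4:ℕ):ℤ) + 1) from by decide,
                   ← add_assoc]
               exact ih _ _ (by omega))
      · norm_num at hlo hhi
        rw [if_neg (by norm_num : ¬ ((5:ℕ):ℤ) = 1), if_neg (by omega : ¬ (-10 < num ∧ num < 10))]
        rw [show onesA ((5:ℕ):ℤ) = (11111:ℤ) from by decide,
            show onesA (((5:ℕ):ℤ) + 1) = (111111:ℤ) from by decide,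
            show PySem.Int.floordiv (10 ^ (5:ℕ) - 1) 9 = (11111:ℤ) from by decide,
            show PySem.Int.floordiv (10 ^ ((5:ℕ) + 1) - 1) 9 = (111111:ℤ) from by decide]
        simp only [Int.abs_eq_natAbs]
        split_ifs <;>
          first
            | omega
            | (rw [show PySem.Str.len (PySem.Int.toStr (11111:ℤ)) = ((5:ℕ):ℤ) from by decide]
               exact ih _ _ (by omega))
            | (rw [show PySem.Str.len (PySem.Int.toStr (111111:ℤ)) = (((5:ℕ):ℤ) + 1) from by decide,
                   ← add_assoc]
               exact ih _ _ (by omega))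
      · norm_num at hlo hhi
        rw [if_neg (by norm_num : ¬ ((6:ℕ):ℤ) = 1), if_neg (by omega : ¬ (-10 < num ∧ num < 10))]
        rw [show onesA ((6:ℕ):ℤ) = (111111:ℤ) from by decide,
            show onesA (((6:ℕ):ℤ) + 1) = (1111111:ℤ) from by decide,
            show PySem.Int.floordiv (10 ^ (6:ℕ) - 1) 9 = (111111:ℤ) from by decide,
            show PySem.Int.floordiv (10 ^ ((6:ℕ) + 1) - 1) 9 = (1111111:ℤ) from by decide]
        simp only [Int.abs_eq_natAbs]
        split_ifs <;>
          first
            | omega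
            | (rw [show PySem.Str.len (PySem.Int.toStr (111111:ℤ)) = ((6:ℕ):ℤ) from by decide]
               exact ih _ _ (by omega))
            | (rw [show PySem.Str.len (PySem.Int.toStr (1111111:ℤ)) = (((6:ℕ):ℤ) + 1) from by decide,
                   ← add_assoc]
               exact ih _ _ (by omega))
      · norm_num at hlo hhi
        rw [if_neg (by norm_num : ¬ ((7:ℕ):ℤ) = 1), if_neg (by omega : ¬ (-10 < num ∧ num < 10))]
        rw [show onesA ((7:ℕ):ℤ) = (1111111:ℤ) from by decide,
            show onesA (((7:ℕ):ℤ) + 1) = (11111111:ℤ) from by decide,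
            show PySem.Int.floordiv (10 ^ (7:ℕ) - 1) 9 = (1111111:ℤ) from by decide,
            show PySem.Int.floordiv (10 ^ ((7:ℕ) + 1) - 1) 9 = (11111111:ℤ) from by decide]
        simp only [Int.abs_eq_natAbs]
        split_ifs <;>
          first
            | omega
            | (rw [show PySem.Str.len (PySem.Int.toStr (1111111:ℤ)) = ((7:ℕ):ℤ) from by decide]
               exact ih _ _ (by omega))
            | (rw [show PySem.Str.len (PySem.Int.toStr (11111111:ℤ)) = (((7:ℕ):ℤ) + 1) from by decide,
                   ← add_assoc]
               exact ih _ _ (by omega))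
      · norm_num at hlo hhi
        rw [if_neg (by norm_num : ¬ ((8:ℕ):ℤ) = 1), if_neg (by omega : ¬ (-10 < num ∧ num < 10))]
        rw [show onesA ((8:ℕ):ℤ) = (11111111:ℤ) from by decide,
            show onesA (((8:ℕ):ℤ) + 1) = (111111111:ℤ) from by decide,
            show PySem.Int.floordiv (10 ^ (8:ℕ) - 1) 9 = (11111111:ℤ) from by decide,
            show PySem.Int.floordiv (10 ^ ((8:ℕ) + 1) - 1) 9 = (111111111:ℤ) from by decide]
        simp only [Int.abs_eq_natAbs]
        split_ifs <;>
          first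
            | omega
            | (rw [show PySem.Str.len (PySem.Int.toStr (11111111:ℤ)) = ((8:ℕ):ℤ) from by decide]
               exact ih _ _ (by omega))
            | (rw [show PySem.Str.len (PySem.Int.toStr (111111111:ℤ)) = (((8:ℕ):ℤ) + 1) from by decide,
                   ← add_assoc]
               exact ih _ _ (by omega))
      · norm_num at hlo hhi
        rw [if_neg (by norm_num : ¬ ((9:ℕ):ℤ) = 1), if_neg (by omega : ¬ (-10 < num ∧ num < 10))]
        rw [show onesA ((9:ℕ):ℤ) = (111111111:ℤ) from by decide,
            show onesA (((9:ℕ):ℤ) + 1) = (1111111111:ℤ) from by decide,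
            show PySem.Int.floordiv (10 ^ (9:ℕ) - 1) 9 = (111111111:ℤ) from by decide,
            show PySem.Int.floordiv (10 ^ ((9:ℕ) + 1) - 1) 9 = (1111111111:ℤ) from by decide]
        simp only [Int.abs_eq_natAbs]
        split_ifs <;>
          first
            | omega
            | (rw [show PySem.Str.len (PySem.Int.toStr (111111111:ℤ)) = ((9:ℕ):ℤ) from by decide]
               exact ih _ _ (by omega))
            | (rw [show PySem.Str.len (PySem.Int.toStr (1111111111:ℤ)) = (((9:ℕ):ℤ) + 1) from by decide,
                   ← add_assoc]
               exact ih _ _ (by omega))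
      · norm_num at hlo hhi
        rw [if_neg (by norm_num : ¬ ((10:ℕ):ℤ) = 1), if_neg (by omega : ¬ (-10 < num ∧ num < 10))]
        rw [show onesA ((10:ℕ):ℤ) = (1111111111:ℤ) from by decide,
            show onesA (((10:ℕ):ℤ) + 1) = (11111111111:ℤ) from by decide,
            show PySem.Int.floordiv (10 ^ (10:ℕ) - 1) 9 = (1111111111:ℤ) from by decide,
            show PySem.Int.floordiv (10 ^ ((10:ℕ) + 1) - 1) 9 = (11111111111:ℤ) from by decide]
        simp only [Int.abs_eq_natAbs]
        split_ifs <;>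
          first
            | omega
            | (rw [show PySem.Str.len (PySem.Int.toStr (1111111111:ℤ)) = ((10:ℕ):ℤ) from by decide]
               exact ih _ _ (by omega))

-- ===== VERDICT (by name: the statement is the Claim_ definition above) =====
theorem helper_py_spec : Claim_equal_helper_py := by
  intro num count hdom
  unfold Spec_helper_py helper_py helper_py_alt
  have hb : num.natAbs ≤ 2147483648 := by
    simp [Dom_helper_py, pvDomInt] at hdom
    omega
  exact go_eq _ num count hb
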